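-- pv_equiv track=rewrite | github.com/MrBrantCode/unitest_baseline | mut_generate/mist_train_cf/cf_57951/solution.py | interleave_reverse
-- ===== SOURCE A (Python) =====
-- def interleave_reverse(arr1, arr2):
--     interleaved = []
--     for i in range(max(len(arr1), len(arr2))):
--         if i < len(arr1):
--             interleaved.append(arr1[i])
--         if i < len(arr2):
--             interleaved.append(arr2[i])
--     return interleaved[::-1]
-- ===== SOURCE B (Python) =====
-- def interleave_reverse(arr1, arr2):
--     m = min(len(arr1), len(arr2))
--     out = (arr1[m:] if len(arr1) > len(arr2) else arr2[m:])[::-1]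
--     for i in range(m - 1, -1, -1):
--         out.append(arr2[i])
--         out.append(arr1[i])
--     return out
-- ===== Notes on version B (the rewrite author's own statement) =====
-- stated objective: alternative
-- what changed: Builds the result directly in final (reversed) order: the overhang of the longer list is reversed first, then a descending-index loop over the common prefix appends arr2[i] before arr1[i], so the interleaved body is never built forwards and never reversed and the per-element bounds guards disappear.
import Mathlib
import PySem

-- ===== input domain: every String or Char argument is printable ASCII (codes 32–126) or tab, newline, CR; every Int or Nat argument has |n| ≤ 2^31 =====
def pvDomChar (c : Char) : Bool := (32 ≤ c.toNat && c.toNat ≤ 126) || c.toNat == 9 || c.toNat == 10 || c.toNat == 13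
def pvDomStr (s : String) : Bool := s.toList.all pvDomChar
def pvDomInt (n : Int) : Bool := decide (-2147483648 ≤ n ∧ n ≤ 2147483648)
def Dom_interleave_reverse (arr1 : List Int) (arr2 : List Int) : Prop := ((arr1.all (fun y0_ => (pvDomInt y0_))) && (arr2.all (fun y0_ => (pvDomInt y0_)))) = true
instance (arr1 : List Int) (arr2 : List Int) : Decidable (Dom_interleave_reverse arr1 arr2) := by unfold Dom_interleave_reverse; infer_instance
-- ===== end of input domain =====

-- B builds the result directly in final order (reversed tail first, then a descending-index
-- loop over the common prefix appending arr2[i] then arr1[i]) instead of interleaving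
-- forwards and reversing at the end (alternative decomposition, same cost).


-- ===== PORT A =====
-- the for-loop over range(max(len,len)) with its two bounds-guarded appends;
-- arr[i] under the guard i < len is List.getD i 0 (exact there)
def pvLoopA (arr1 arr2 : List Int) (i : Nat) (acc : List Int) : List Int :=
  if i < max arr1.length arr2.length then
    let acc1 := if i < arr1.length then acc ++ [arr1.getD i 0] else acc
    let acc2 := if i < arr2.length then acc1 ++ [arr2.getD i 0] else acc1
    pvLoopA arr1 arr2 (i + 1) acc2
  else acc
termination_by max arr1.length arr2.length - i

-- interleaved[::-1] is List.reverse (exact)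
def interleave_reverse (arr1 : List Int) (arr2 : List Int) : List Int :=
  (pvLoopA arr1 arr2 0 []).reverse

-- ===== PORT B =====
-- the descending for-loop 'for i in range(m-1, -1, -1)': first iteration uses i = k-1;
-- arr[i] with 0 ≤ i < len is List.getD i 0 (exact there)
def pvLoopB (arr1 arr2 : List Int) : Nat → List Int → List Int
  | 0, acc => acc
  | k + 1, acc => pvLoopB arr1 arr2 k (acc ++ [arr2.getD k 0, arr1.getD k 0])

-- the overhang slice arr[m:] (m = min length ≥ 0) is List.drop m, and [::-1] is reverse (exact)
def interleave_reverse_alt (arr1 : List Int) (arr2 : List Int) : List Int :=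
  let m := min arr1.length arr2.length
  let out := (if arr1.length > arr2.length then arr1.drop m else arr2.drop m).reverse
  pvLoopB arr1 arr2 m out

-- ===== PRECONDITION & SPEC =====
def Spec_interleave_reverse (arr1 : List Int) (arr2 : List Int) (out : List Int) : Prop := out = interleave_reverse_alt arr1 arr2
instance (arr1 : List Int) (arr2 : List Int) (out : List Int) : Decidable (Spec_interleave_reverse arr1 arr2 out) := by unfold Spec_interleave_reverse; infer_instance

-- ===== CLAIM (what is proved, stated in full; the proofs are below) =====
def Claim_equal_interleave_reverse : Prop := ∀ (arr1 : List Int) (arr2 : List Int), Dom_interleave_reverse arr1 arr2 → Spec_interleave_reverse arr1 arr2 (interleave_reverse arr1 arr2)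

-- ===== LEMMAS AND PROOFS =====

-- the (unreversed) interleaving A computes
def pvInter : List Int → List Int → List Int
  | [], bs => bs
  | a :: as, [] => a :: as
  | a :: as, b :: bs => a :: b :: pvInter as bs

theorem pvInter_nil_right (as : List Int) : pvInter as [] = as := by
  cases as <;> rfl

theorem loopA_eq (arr1 arr2 : List Int) (i : Nat) (acc : List Int) :
    pvLoopA arr1 arr2 i acc = acc ++ pvInter (arr1.drop i) (arr2.drop i) := by
  fun_induction pvLoopA arr1 arr2 i acc with
  | case1 i acc hlt acc1 acc2 ih =>
    rw [ih]
    by_cases h1 : i < arr1.length <;> by_cases h2 : i < arr2.length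
    · rw [List.drop_eq_getElem_cons h1, List.drop_eq_getElem_cons h2]
      simp [acc2, acc1, h1, h2, pvInter, List.getD_eq_getElem, List.getD_eq_getElem]
    · have : arr2.drop i = [] := List.drop_eq_nil_of_le (by omega)
      rw [List.drop_eq_getElem_cons h1, this]
      have : arr2.drop (i+1) = [] := List.drop_eq_nil_of_le (by omega)
      simp [acc2, acc1, h1, h2, this, pvInter, pvInter_nil_right]
    · have : arr1.drop i = [] := List.drop_eq_nil_of_le (by omega)
      rw [this, List.drop_eq_getElem_cons h2]
      have : arr1.drop (i+1) = [] := List.drop_eq_nil_of_le (by omega)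
      simp [acc2, acc1, h1, h2, this, pvInter]
    · omega
  | case2 i acc hge =>
    have e1 : arr1.drop i = [] := List.drop_eq_nil_of_le (by omega)
    have e2 : arr2.drop i = [] := List.drop_eq_nil_of_le (by omega)
    simp [e1, e2, pvInter]

-- pvInter on one more element of each prefix
theorem pvInter_take_succ (arr1 arr2 : List Int) (k : Nat)
    (h1 : k < arr1.length) (h2 : k < arr2.length) :
    pvInter (arr1.take (k+1)) (arr2.take (k+1))
      = pvInter (arr1.take k) (arr2.take k) ++ [arr1.getD k 0, arr2.getD k 0] := by
  induction k generalizing arr1 arr2 with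
  | zero =>
    cases arr1 with
    | nil => simp at h1
    | cons a as =>
      cases arr2 with
      | nil => simp at h2
      | cons b bs => simp [pvInter]
  | succ k ih =>
    cases arr1 with
    | nil => simp at h1
    | cons a as =>
      cases arr2 with
      | nil => simp at h2
      | cons b bs =>
        simp only [List.take_succ_cons, pvInter, List.getD_cons_succ]
        rw [ih as bs (by simpa using h1) (by simpa using h2)]
        simp

-- B's descending loop prepends the reversed interleave of the k-prefixes
theorem loopB_eq (arr1 arr2 : List Int) (k : Nat) (acc : List Int)
    (h1 : k ≤ arr1.length) (h2 : k ≤ arr2.length) :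
    pvLoopB arr1 arr2 k acc = acc ++ (pvInter (arr1.take k) (arr2.take k)).reverse := by
  induction k generalizing acc with
  | zero => simp [pvLoopB, pvInter]
  | succ k ih =>
    rw [pvLoopB, ih _ (by omega) (by omega),
        pvInter_take_succ arr1 arr2 k (by omega) (by omega)]
    simp

-- splitting the interleave at the common-prefix boundary
theorem pvInter_split (arr1 arr2 : List Int) :
    pvInter arr1 arr2
      = pvInter (arr1.take (min arr1.length arr2.length)) (arr2.take (min arr1.length arr2.length))
        ++ arr1.drop (min arr1.length arr2.length) ++ arr2.drop (min arr1.length arr2.length) := by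
  induction arr1 generalizing arr2 with
  | nil => simp [pvInter]
  | cons a as ih =>
    cases arr2 with
    | nil => simp [pvInter_nil_right, pvInter]
    | cons b bs =>
      have hmin : min (as.length + 1) (bs.length + 1) = min as.length bs.length + 1 := by omega
      simp only [List.length_cons, hmin, List.take_succ_cons, List.drop_succ_cons, pvInter]
      rw [ih bs]
      simp

-- ===== VERDICT (by name: the statement is the Claim_ definition above) =====
theorem interleave_reverse_spec : Claim_equal_interleave_reverse := by
  intro arr1 arr2 _
  unfold Spec_interleave_reverse interleave_reverse interleave_reverse_alt
  rw [loopA_eq, loopB_eq _ _ _ _ (by omega) (by omega)]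
  simp only [List.drop_zero]
  rw [pvInter_split arr1 arr2]
  by_cases h : arr1.length > arr2.length
  · have : arr2.drop (min arr1.length arr2.length) = [] := List.drop_eq_nil_of_le (by omega)
    simp [h, this]
  · have : arr1.drop (min arr1.length arr2.length) = [] := List.drop_eq_nil_of_le (by omega)
    simp [h, this]
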